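-- pv_equiv track=rewrite | github.com/radwan48/foundations-cs-python | assignment3.py | is_rotation_matrix
-- ===== SOURCE A (Python) =====
-- def is_rotation_matrix(matrix1, matrix2):  # Overall Time complexity for this function is O(n^2)
--     # Check if the dimensions of the matrices are compatible for being rotations
--     if len(matrix1) != len(matrix2[0]) or len(matrix1[0]) != len(matrix2):  # just checking so it is O(1)
--         return False
--     for i in range(len(matrix1)):  # O(n)
--         for j in range(len(matrix1[0])):  # O(n)
--            if matrix1[i][j] != matrix2[j][i]:  # O(1)
--
--                return False
--     return True
-- ===== SOURCE B (Python) =====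
-- def is_rotation_matrix(matrix1, matrix2):
--     # Same dimension guard as A; then a structural recursion: matrix1's first row
--     # must equal matrix2's first column, recurse on matrix1's remaining rows and
--     # matrix2 with each row's first entry dropped. No index arithmetic at all.
--     if len(matrix1) != len(matrix2[0]) or len(matrix1[0]) != len(matrix2):
--         return False
--     def check(rows, cols):
--         if not rows:
--             return True
--         if rows[0] != [r[0] for r in cols]:
--             return False
--         return check(rows[1:], [r[1:] for r in cols])
--     return check(matrix1, matrix2)
-- ===== Notes on version B (the rewrite author's own statement) =====
-- stated objective: alternative
-- what changed: Replaces A's doubly-indexed nested loops with a structural recursion that peels matrix1's first row against matrix2's first column and recurses on the shrunken matrices (no indices maintained).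
-- outside the precondition, e.g. on is_rotation_matrix([[1], [2, 5]], [[1, 2]]): A returns True, B returns False
import Mathlib
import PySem

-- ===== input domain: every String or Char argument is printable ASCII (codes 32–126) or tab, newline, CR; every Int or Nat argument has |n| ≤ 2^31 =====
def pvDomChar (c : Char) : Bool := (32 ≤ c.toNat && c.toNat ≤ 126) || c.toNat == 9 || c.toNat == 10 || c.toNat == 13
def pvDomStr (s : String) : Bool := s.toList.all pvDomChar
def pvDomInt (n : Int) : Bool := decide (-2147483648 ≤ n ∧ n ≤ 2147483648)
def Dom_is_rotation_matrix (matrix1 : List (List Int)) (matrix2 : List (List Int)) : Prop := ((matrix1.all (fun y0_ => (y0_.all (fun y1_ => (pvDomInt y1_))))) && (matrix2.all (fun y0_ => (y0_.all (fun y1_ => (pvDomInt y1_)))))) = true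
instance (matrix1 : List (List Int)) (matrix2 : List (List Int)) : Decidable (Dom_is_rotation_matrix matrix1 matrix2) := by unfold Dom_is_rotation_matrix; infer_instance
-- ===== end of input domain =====

-- B replaces A's nested index loops with a structural recursion peeling matrix1's
-- first row against matrix2's first column (alternative; same cost). Return-value equivalence.

-- ===== PORT A =====
-- Nested loops over range(len(matrix1)) × range(len(matrix1[0])); `.all` realises the
-- early `return False`. `getD` defaults are only reached outside Pre_.
def is_rotation_matrix (matrix1 : List (List Int)) (matrix2 : List (List Int)) : Bool :=
  if matrix1.length != (matrix2.headD []).length || (matrix1.headD []).length != matrix2.length then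
    false
  else
    (List.range matrix1.length).all (fun i =>
      (List.range (matrix1.headD []).length).all (fun j =>
        ((matrix1.getD i []).getD j 0) == ((matrix2.getD j []).getD i 0)))

-- ===== PORT B =====
-- Source B's `check`: first row of `rows` vs first column of `cols`, then recurse on the
-- tails (`r[0]` defaults only outside Pre_; `r[1:]` is `drop 1`, exact for that slice).
def checkPeel : List (List Int) → List (List Int) → Bool
  | [], _ => true
  | h :: rest, cols =>
    if h != cols.map (fun r => r.headD 0) then false
    else checkPeel rest (cols.map (fun r => r.drop 1))

def is_rotation_matrix_alt (matrix1 : List (List Int)) (matrix2 : List (List Int)) : Bool :=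
  if matrix1.length != (matrix2.headD []).length || (matrix1.headD []).length != matrix2.length then
    false
  else
    checkPeel matrix1 matrix2

-- ===== PRECONDITION & SPEC =====
-- Pre_ excludes (a) inputs where A raises IndexError (matrix2 = [], or matrix1 = []
-- with the first guard comparison equal, or a too-short ragged row hit by the loop)
-- and (b) ragged matrices that pass the dimension guard, where A's row-0-width
-- indexing silently skips trailing entries — an artefact on which A's value and
-- B's column-peeling value are equally defensible.
def Pre_is_rotation_matrix (matrix1 : List (List Int)) (matrix2 : List (List Int)) : Prop :=
  matrix2 ≠ [] ∧
  (matrix1.length = (matrix2.headD []).length →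
    (matrix1 ≠ [] ∧
      ((matrix1.headD []).length = matrix2.length →
        ((∀ r ∈ matrix1, r.length = (matrix1.headD []).length) ∧
         (∀ r ∈ matrix2, r.length = (matrix2.headD []).length)))))
instance (matrix1 : List (List Int)) (matrix2 : List (List Int)) : Decidable (Pre_is_rotation_matrix matrix1 matrix2) := by unfold Pre_is_rotation_matrix; infer_instance

def pvWitness_is_rotation_matrix : List (List Int) × List (List Int) := ([[1, 2], [3, 4]], [[1, 3], [2, 4]])

def Spec_is_rotation_matrix (matrix1 : List (List Int)) (matrix2 : List (List Int)) (out : Bool) : Prop := out = is_rotation_matrix_alt matrix1 matrix2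
instance (matrix1 : List (List Int)) (matrix2 : List (List Int)) (out : Bool) : Decidable (Spec_is_rotation_matrix matrix1 matrix2 out) := by unfold Spec_is_rotation_matrix; infer_instance

-- ===== CLAIM =====
def Claim_equal_is_rotation_matrix : Prop := ∀ (matrix1 : List (List Int)) (matrix2 : List (List Int)), Dom_is_rotation_matrix matrix1 matrix2 → Pre_is_rotation_matrix matrix1 matrix2 → Spec_is_rotation_matrix matrix1 matrix2 (is_rotation_matrix matrix1 matrix2)

-- ===== LEMMAS AND PROOFS =====

lemma getD_lt {a : Type} (l : List a) (d : a) (i : Nat) (h : i < l.length) :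
    l.getD i d = l[i] := by
  rw [List.getD_eq_getElem?_getD, List.getElem?_eq_getElem h]
  rfl

lemma getD_drop (r : List Int) (i : Nat) :
    (r.drop 1).getD i 0 = r.getD (i + 1) 0 := by
  rw [List.getD_eq_getElem?_getD, List.getD_eq_getElem?_getD, List.getElem?_drop]
  rw [Nat.add_comm]

-- checkPeel's exact meaning: every row of rows equals the corresponding column of cols
lemma checkPeel_iff (rows : List (List Int)) : ∀ (cols : List (List Int)),
    checkPeel rows cols = true ↔
      ∀ i (hi : i < rows.length), rows[i] = cols.map (fun r => r.getD i 0) := by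
  induction rows with
  | nil => intro cols; simp [checkPeel]
  | cons h rest ih =>
    intro cols
    simp only [checkPeel]
    by_cases hh : h = cols.map (fun r => r.headD 0)
    · rw [if_neg (by simpa using hh), ih]
      constructor
      · intro hall i hi
        cases i with
        | zero =>
          simpa using hh.trans (by
            apply List.map_congr_left; intro r _
            cases r <;> simp)
        | succ n =>
          rw [List.getElem_cons_succ, hall n (by simpa using hi), List.map_map]
          apply List.map_congr_left; intro r _
          exact getD_drop r n
      · intro hall i hi
        have h2 := hall (i + 1) (by simpa using hi)
        rw [List.getElem_cons_succ] at h2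
        rw [h2, List.map_map]
        apply List.map_congr_left; intro r _
        exact (getD_drop r i).symm
    · rw [if_pos (by simpa using hh)]
      simp only [Bool.false_eq_true, false_iff, not_forall]
      refine ⟨0, by simp, ?_⟩
      simp only [List.getElem_cons_zero]
      intro hc
      exact hh (hc.trans (by
        apply List.map_congr_left; intro r _
        cases r <;> simp))

-- the nested all-loop agrees with the peeling recursion on rectangular inputs
lemma core (m1 m2 : List (List Int)) (w : Nat)
    (hr1 : ∀ r ∈ m1, r.length = w)
    (hm2len : m2.length = w)
    (hrow2 : ∀ r ∈ m2, r.length = m1.length) :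
    ((List.range m1.length).all (fun i =>
      (List.range w).all (fun j =>
        ((m1.getD i []).getD j 0) == ((m2.getD j []).getD i 0))))
    = checkPeel m1 m2 := by
  rw [Bool.eq_iff_iff, checkPeel_iff]
  simp only [List.all_eq_true, List.mem_range, beq_iff_eq]
  constructor
  · intro hall i hi
    apply List.ext_getElem
    · simp [hr1 _ (List.getElem_mem hi), hm2len]
    · intro j hj1 hj2
      have hjw : j < w := by
        have := hr1 _ (List.getElem_mem hi); omega
      have hjm2 : j < m2.length := by omega
      simp only [List.getElem_map]
      have h := hall i hi j hjw
      rw [getD_lt m1 [] i hi] at h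
      rw [getD_lt _ 0 j (by rw [hr1 _ (List.getElem_mem hi)]; exact hjw)] at h
      rw [getD_lt m2 [] j hjm2] at h
      rw [getD_lt _ 0 i (by rw [hrow2 _ (List.getElem_mem hjm2)]; exact hi)] at h
      rw [getD_lt _ 0 i (by rw [hrow2 _ (List.getElem_mem hjm2)]; exact hi)]
      exact h
  · intro heq i hi j hj
    have hjm2 : j < m2.length := by omega
    have h1 := List.getElem_of_eq (heq i hi) (show j < _ by
      rw [hr1 _ (List.getElem_mem hi)]; exact hj)
    simp only [List.getElem_map] at h1
    rw [getD_lt m1 [] i hi]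
    rw [getD_lt _ 0 j (by rw [hr1 _ (List.getElem_mem hi)]; exact hj)]
    rw [getD_lt m2 [] j hjm2]
    rw [getD_lt _ 0 i (by rw [hrow2 _ (List.getElem_mem hjm2)]; exact hi)]
    rw [getD_lt _ 0 i (by rw [hrow2 _ (List.getElem_mem hjm2)]; exact hi)] at h1
    exact h1

-- ===== VERDICT =====
theorem is_rotation_matrix_spec : Claim_equal_is_rotation_matrix := by
  intro m1 m2 _ hpre
  unfold Spec_is_rotation_matrix is_rotation_matrix is_rotation_matrix_alt
  obtain ⟨hm2, hpre1⟩ := hpre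
  by_cases hguard : (m1.length != (m2.headD []).length || (m1.headD []).length != m2.length) = true
  · rw [if_pos hguard, if_pos hguard]
  · rw [if_neg hguard, if_neg hguard]
    simp only [Bool.or_eq_true, bne_iff_ne, not_or, ne_eq, not_not] at hguard
    obtain ⟨h1, h2⟩ := hguard
    obtain ⟨hm1, hrect⟩ := hpre1 h1
    obtain ⟨hr1, hr2⟩ := hrect h2
    have hrow2 : ∀ r ∈ m2, r.length = m1.length := by
      intro r hr
      rw [hr2 r hr, ← h1]
    exact core m1 m2 (m1.headD []).length hr1 h2.symm hrow2
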